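-- pv_equiv track=rewrite | github.com/DmitriChe/python-alorithms-hw | hw5/task5_2_hex_addition.py | hex_addition
-- ===== SOURCE A (Python) =====
-- def hex_addition(lst1, lst2):
--     max_len = max(len(lst1), len(lst2))
--     sum_hex = []
--     appendix = 0
--     for i in range(max_len):
--         dig1 = hex_to_dec(lst1[i])
--         dig2 = hex_to_dec(lst2[i])
--         dig_sum = (dig1 + dig2 + appendix)
--         if dig_sum > 15:
--             appendix = 1
--             sum_hex += dec_to_hex(dig_sum - 16)
--         else:
--             appendix = 0
--             sum_hex += dec_to_hex(dig_sum)
--         if i == max_len - 1 and appendix > 0: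
--             sum_hex += str(appendix)
--
--     return sum_hex
--
-- def hex_to_dec(key):
--
--     hextodec_dict = {
--         '0': 0, '1': 1, '2': 2, '3': 3, '4': 4, '5': 5, '6': 6, '7': 7, '8': 8, '9': 9,
--         'a': 10, 'b': 11, 'c': 12, 'd': 13, 'e': 14, 'f': 15
--     }
--
--     return hextodec_dict[key]
--
-- def dec_to_hex(key):
--
--     dectohex_dict = {
--         0: '0', 1: '1', 2: '2', 3: '3', 4: '4', 5: '5', 6: '6', 7: '7', 8: '8', 9: '9',
--         10: 'a', 11: 'b', 12: 'c', 13: 'd', 14: 'e', 15: 'f'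
--     }
--
--     return dectohex_dict[key]
-- ===== SOURCE B (Python) =====
-- def hex_addition(lst1, lst2):
--     digits = "0123456789abcdef"
--     v1 = 0
--     for d in reversed(lst1):
--         v1 = v1 * 16 + digits.index(d)
--     v2 = 0
--     for d in reversed(lst2):
--         v2 = v2 * 16 + digits.index(d)
--     total = v1 + v2
--     out = []
--     for _ in range(len(lst1)):
--         out.append(digits[total % 16])
--         total //= 16
--     if total:
--         out.append(str(total))
--     return out
-- ===== Notes on version B (the rewrite author's own statement) =====
-- stated objective: simpler
-- what changed: B converts both little-endian digit lists to integers by Horner evaluation, adds them once, and re-emits the digits of the sum with % 16 and //= 16, instead of A's per-digit loop that carries an explicit appendix flag and a 16-way branch with hand-written lookup dicts.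
import Mathlib
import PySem

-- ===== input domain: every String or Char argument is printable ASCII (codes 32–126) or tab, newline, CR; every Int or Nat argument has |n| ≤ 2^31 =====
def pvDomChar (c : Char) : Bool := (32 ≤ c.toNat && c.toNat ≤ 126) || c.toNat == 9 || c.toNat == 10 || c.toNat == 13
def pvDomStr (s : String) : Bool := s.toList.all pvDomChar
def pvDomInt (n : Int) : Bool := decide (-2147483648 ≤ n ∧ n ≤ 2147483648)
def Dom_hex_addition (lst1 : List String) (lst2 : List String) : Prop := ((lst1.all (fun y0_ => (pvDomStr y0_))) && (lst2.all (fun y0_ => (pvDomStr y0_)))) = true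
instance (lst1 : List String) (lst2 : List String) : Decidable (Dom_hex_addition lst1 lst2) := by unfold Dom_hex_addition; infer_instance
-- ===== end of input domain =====

-- B replaces A's per-digit carry loop by Horner conversion to integers, one addition,
-- and re-emission of base-16 digits (simpler; same O(n) cost).

-- ===== PORT A =====
def hextodec_dict : PySem.Dict String Int :=
  PySem.Dict.ofList [("0",0),("1",1),("2",2),("3",3),("4",4),("5",5),("6",6),("7",7),
                     ("8",8),("9",9),("a",10),("b",11),("c",12),("d",13),("e",14),("f",15)]

-- dict[key]; KeyError (missing key) is excluded by Pre_hex_addition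
def hex_to_dec (key : String) : Int := (hextodec_dict.get? key).getD 0

def dectohex_dict : PySem.Dict Int String :=
  PySem.Dict.ofList [(0,"0"),(1,"1"),(2,"2"),(3,"3"),(4,"4"),(5,"5"),(6,"6"),(7,"7"),
                     (8,"8"),(9,"9"),(10,"a"),(11,"b"),(12,"c"),(13,"d"),(14,"e"),(15,"f")]

-- dict[key]; under Pre_ every looked-up key is in range, so no KeyError occurs
def dec_to_hex (key : Int) : String := (dectohex_dict.get? key).getD ""

-- lst[i]; IndexError (unequal lengths) is excluded by Pre_hex_addition
def hex_addition (lst1 : List String) (lst2 : List String) : List String :=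
  let maxLen := max lst1.length lst2.length
  ((List.range maxLen).foldl (fun (st : List String × Int) (i : Nat) =>
      let dig1 := hex_to_dec ((PySem.List.pyGet? lst1 (i : Int)).getD "")
      let dig2 := hex_to_dec ((PySem.List.pyGet? lst2 (i : Int)).getD "")
      let digSum := dig1 + dig2 + st.2
      let st1 := if digSum > 15
        then (st.1 ++ (dec_to_hex (digSum - 16)).toList.map (fun c => String.ofList [c]), (1 : Int))
        else (st.1 ++ (dec_to_hex digSum).toList.map (fun c => String.ofList [c]), (0 : Int))
      if i = maxLen - 1 ∧ st1.2 > 0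
        then (st1.1 ++ (PySem.Int.toStr st1.2).toList.map (fun c => String.ofList [c]), st1.2)
        else st1)
    ([], 0)).1

-- ===== PORT B =====
-- digits.index(d); ValueError (invalid digit) is excluded by Pre_hex_addition (find returns -1 there)
def hex_addition_alt (lst1 : List String) (lst2 : List String) : List String :=
  let digits := "0123456789abcdef"
  let v1 := lst1.reverse.foldl (fun v d => v * 16 + PySem.Str.find digits d) 0
  let v2 := lst2.reverse.foldl (fun v d => v * 16 + PySem.Str.find digits d) 0
  let st := (List.range lst1.length).foldl (fun (st : List String × Int) _ =>
      (st.1 ++ [((PySem.Str.pyGet? digits (PySem.Int.mod st.2 16)).map (fun c => String.ofList [c])).getD ""],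
       PySem.Int.floordiv st.2 16)) ([], v1 + v2)
  if st.2 ≠ 0 then st.1 ++ [PySem.Int.toStr st.2] else st.1

-- ===== PRECONDITION & SPEC =====
def hexKeys : List String :=
  ["0","1","2","3","4","5","6","7","8","9","a","b","c","d","e","f"]

-- Pre_ = exactly the inputs where A returns: equal lengths (else IndexError) and every
-- element a single lowercase hex-digit string (else KeyError in hex_to_dec).
def Pre_hex_addition (lst1 : List String) (lst2 : List String) : Prop :=
  lst1.length = lst2.length ∧ (∀ d ∈ lst1, d ∈ hexKeys) ∧ (∀ d ∈ lst2, d ∈ hexKeys)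
instance (lst1 : List String) (lst2 : List String) : Decidable (Pre_hex_addition lst1 lst2) := by
  unfold Pre_hex_addition; infer_instance

def pvWitness_hex_addition : List String × List String := (["f","1"], ["2","3"])

def Spec_hex_addition (lst1 : List String) (lst2 : List String) (out : List String) : Prop := out = hex_addition_alt lst1 lst2
instance (lst1 : List String) (lst2 : List String) (out : List String) : Decidable (Spec_hex_addition lst1 lst2 out) := by unfold Spec_hex_addition; infer_instance

-- ===== CLAIM (what is proved, stated in full; the proofs are below) =====
def Claim_equal_hex_addition : Prop := ∀ (lst1 : List String) (lst2 : List String), Dom_hex_addition lst1 lst2 → Pre_hex_addition lst1 lst2 → Spec_hex_addition lst1 lst2 (hex_addition lst1 lst2)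

-- ===== LEMMAS AND PROOFS =====

-- little-endian value of a digit list
def pvVal : List String → Int
  | [] => 0
  | d :: t => hex_to_dec d + 16 * pvVal t

-- one output digit, as B produces it
def pvDig (v : Int) : String :=
  ((PySem.Str.pyGet? "0123456789abcdef" v).map (fun c => String.ofList [c])).getD ""

-- the k low base-16 digits of t (little-endian)
def pvRdig : Nat → Int → List String
  | 0, _ => []
  | k+1, t => pvDig (t % 16) :: pvRdig k (t / 16)

lemma hex_to_dec_bounds (d : String) (hd : d ∈ hexKeys) :
    0 ≤ hex_to_dec d ∧ hex_to_dec d < 16 := by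
  simp [hexKeys] at hd
  rcases hd with rfl|rfl|rfl|rfl|rfl|rfl|rfl|rfl|rfl|rfl|rfl|rfl|rfl|rfl|rfl|rfl <;> decide

lemma find_eq_hex_to_dec (d : String) (hd : d ∈ hexKeys) :
    PySem.Str.find "0123456789abcdef" d = hex_to_dec d := by
  simp [hexKeys] at hd
  rcases hd with rfl|rfl|rfl|rfl|rfl|rfl|rfl|rfl|rfl|rfl|rfl|rfl|rfl|rfl|rfl|rfl <;> decide

lemma dec_to_hex_eq_dig (v : Int) (h0 : 0 ≤ v) (h16 : v < 16) :
    (dec_to_hex v).toList.map (fun c => String.ofList [c]) = [pvDig v] := by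
  interval_cases v <;> decide

lemma pvVal_bounds (l : List String) (hl : ∀ d ∈ l, d ∈ hexKeys) :
    0 ≤ pvVal l ∧ pvVal l ≤ 16 ^ l.length - 1 := by
  induction l with
  | nil => simp [pvVal]
  | cons d t ih =>
    have hd := hex_to_dec_bounds d (hl d (by simp))
    have ht := ih (fun x hx => hl x (by simp [hx]))
    simp only [pvVal, List.length_cons, pow_succ]
    constructor <;> nlinarith [ht.1, ht.2, hd.1, hd.2]

lemma horner_eq_val (l : List String) (hl : ∀ d ∈ l, d ∈ hexKeys) :
    l.reverse.foldl (fun v d => v * 16 + PySem.Str.find "0123456789abcdef" d) 0 = pvVal l := by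
  suffices h : ∀ (a : Int), l.reverse.foldl (fun v d => v * 16 + PySem.Str.find "0123456789abcdef" d) a
      = a * 16 ^ l.length + pvVal l by
    simpa using h 0
  induction l with
  | nil => simp [pvVal]
  | cons d t ih =>
    intro a
    have hd := find_eq_hex_to_dec d (hl d (by simp))
    simp only [List.reverse_cons, List.foldl_append, List.foldl_cons, List.foldl_nil,
      ih (fun x hx => hl x (by simp [hx])), hd, pvVal, List.length_cons, pow_succ]
    ring

lemma pvRdig_succ_append (k : Nat) (t : Int) :
    pvRdig (k+1) t = pvRdig k t ++ [pvDig (t / 16 ^ k % 16)] := by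
  induction k generalizing t with
  | zero => simp [pvRdig]
  | succ k ih =>
    have h : t / 16 / 16 ^ k = t / 16 ^ (k+1) := by
      rw [Int.ediv_ediv_of_nonneg (by norm_num), pow_succ']
    calc pvRdig (k+1+1) t = pvDig (t % 16) :: pvRdig (k+1) (t/16) := rfl
      _ = pvDig (t % 16) :: (pvRdig k (t/16) ++ [pvDig (t/16/16^k % 16)]) := by rw [ih]
      _ = pvRdig (k+1) t ++ [pvDig (t / 16^(k+1) % 16)] := by rw [h]; rfl

lemma b_loop (n : Nat) (pref : List String) (t : Int) :
    (List.range n).foldl (fun (st : List String × Int) _ =>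
      (st.1 ++ [((PySem.Str.pyGet? "0123456789abcdef" (PySem.Int.mod st.2 16)).map (fun c => String.ofList [c])).getD ""],
       PySem.Int.floordiv st.2 16)) (pref, t)
    = (pref ++ pvRdig n t, t / 16 ^ n) := by
  induction n generalizing pref t with
  | zero => simp [pvRdig]
  | succ n ih =>
    rw [List.range_succ, List.foldl_append, ih]
    simp only [List.foldl_cons, List.foldl_nil]
    rw [PySem.Int.mod_eq_emod_of_pos (by norm_num), PySem.Int.floordiv_eq_ediv_of_pos (by norm_num)]
    rw [pvRdig_succ_append]
    have h : t / 16 ^ n / 16 = t / 16 ^ (n+1) := by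
      rw [Int.ediv_ediv_of_nonneg (by positivity), ← pow_succ]
    rw [h]
    simp [pvDig, List.append_assoc]

lemma pvVal_take_drop (l : List String) (k : Nat) :
    pvVal l = pvVal (l.take k) + 16 ^ (min k l.length) * pvVal (l.drop k) := by
  induction l generalizing k with
  | nil => simp [pvVal]
  | cons d t ih =>
    cases k with
    | zero => simp [pvVal]
    | succ k =>
      simp only [List.take_succ_cons, List.drop_succ_cons, pvVal, List.length_cons,
        Nat.succ_min_succ, pow_succ, ih k]
      ring

lemma pvVal_append_singleton (xs : List String) (d : String) :
    pvVal (xs ++ [d]) = pvVal xs + 16 ^ xs.length * hex_to_dec d := by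
  induction xs with
  | nil => simp [pvVal]
  | cons x t ih => simp only [List.cons_append, pvVal, ih, List.length_cons, pow_succ]; ring

-- A's loop body, named for the proofs (definitionally the lambda inside hex_addition)
def pvBodyA (l1 l2 : List String) (n : Nat) : (List String × Int) → Nat → (List String × Int) :=
  fun st i =>
      let dig1 := hex_to_dec ((PySem.List.pyGet? l1 (i : Int)).getD "")
      let dig2 := hex_to_dec ((PySem.List.pyGet? l2 (i : Int)).getD "")
      let digSum := dig1 + dig2 + st.2
      let st1 := if digSum > 15
        then (st.1 ++ (dec_to_hex (digSum - 16)).toList.map (fun c => String.ofList [c]), (1 : Int))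
        else (st.1 ++ (dec_to_hex digSum).toList.map (fun c => String.ofList [c]), (0 : Int))
      if i = n - 1 ∧ st1.2 > 0
        then (st1.1 ++ (PySem.Int.toStr st1.2).toList.map (fun c => String.ofList [c]), st1.2)
        else st1

-- one step of A's loop, before the last-index branch
lemma a_step (l1 l2 : List String) (n : Nat)
    (h1 : l1.length = n) (h2 : l2.length = n)
    (hv1 : ∀ d ∈ l1, d ∈ hexKeys) (hv2 : ∀ d ∈ l2, d ∈ hexKeys)
    (k : Nat) (hk : k < n) :
    pvBodyA l1 l2 n (pvRdig k (pvVal l1 + pvVal l2), (pvVal (l1.take k) + pvVal (l2.take k)) / 16 ^ k) k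
    = (let st1 := (pvRdig (k+1) (pvVal l1 + pvVal l2),
                   (pvVal (l1.take (k+1)) + pvVal (l2.take (k+1))) / 16 ^ (k+1))
       if k = n - 1 ∧ st1.2 > 0
        then (st1.1 ++ (PySem.Int.toStr st1.2).toList.map (fun c => String.ofList [c]), st1.2)
        else st1) := by
  have hk1 : k < l1.length := by omega
  have hk2 : k < l2.length := by omega
  have hmem1 : l1[k] ∈ hexKeys := hv1 _ (l1.getElem_mem hk1)
  have hmem2 : l2[k] ∈ hexKeys := hv2 _ (l2.getElem_mem hk2)
  have hd1 := hex_to_dec_bounds _ hmem1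
  have hd2 := hex_to_dec_bounds _ hmem2
  have hg1 : (PySem.List.pyGet? l1 (k : Int)).getD "" = l1[k] := by
    simp [PySem.List.pyGet?_natCast, List.getElem?_eq_getElem hk1]
  have hg2 : (PySem.List.pyGet? l2 (k : Int)).getD "" = l2[k] := by
    simp [PySem.List.pyGet?_natCast, List.getElem?_eq_getElem hk2]
  have hlen1 : (l1.take k).length = k := by simp; omega
  have hlen2 : (l2.take k).length = k := by simp; omega
  have htk1 := pvVal_bounds (l1.take k) (fun d hd => hv1 d (List.mem_of_mem_take hd))
  have htk2 := pvVal_bounds (l2.take k) (fun d hd => hv2 d (List.mem_of_mem_take hd))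
  rw [hlen1] at htk1
  rw [hlen2] at htk2
  have hpow : (0:Int) < 16 ^ k := by positivity
  have hc0 : 0 ≤ (pvVal (l1.take k) + pvVal (l2.take k)) / 16 ^ k :=
    Int.ediv_nonneg (by omega) (by omega)
  have hc2 : (pvVal (l1.take k) + pvVal (l2.take k)) / 16 ^ k < 2 := by
    rw [Int.ediv_lt_iff_lt_mul hpow]; omega
  have hts1 : l1.take (k+1) = l1.take k ++ [l1[k]] := by
    rw [List.take_succ]; simp [List.getElem?_eq_getElem hk1]
  have hts2 : l2.take (k+1) = l2.take k ++ [l2[k]] := by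
    rw [List.take_succ]; simp [List.getElem?_eq_getElem hk2]
  have hva1 : pvVal (l1.take (k+1)) = pvVal (l1.take k) + 16 ^ k * hex_to_dec l1[k] := by
    rw [hts1, pvVal_append_singleton, hlen1]
  have hva2 : pvVal (l2.take (k+1)) = pvVal (l2.take k) + 16 ^ k * hex_to_dec l2[k] := by
    rw [hts2, pvVal_append_singleton, hlen2]
  have hsplit1 : pvVal l1 = pvVal (l1.take (k+1)) + 16 ^ (k+1) * pvVal (l1.drop (k+1)) := by
    have h := pvVal_take_drop l1 (k+1)
    rwa [min_eq_left (by omega)] at h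
  have hsplit2 : pvVal l2 = pvVal (l2.take (k+1)) + 16 ^ (k+1) * pvVal (l2.drop (k+1)) := by
    have h := pvVal_take_drop l2 (k+1)
    rwa [min_eq_left (by omega)] at h
  have hR1 : 0 ≤ pvVal (l1.drop (k+1)) :=
    (pvVal_bounds _ (fun d hd => hv1 d (List.mem_of_mem_drop hd))).1
  have hR2 : 0 ≤ pvVal (l2.drop (k+1)) :=
    (pvVal_bounds _ (fun d hd => hv2 d (List.mem_of_mem_drop hd))).1
  have hT : pvVal l1 + pvVal l2 = (pvVal (l1.take k) + pvVal (l2.take k)) +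
      (hex_to_dec l1[k] + hex_to_dec l2[k] + 16 * (pvVal (l1.drop (k+1)) + pvVal (l2.drop (k+1)))) * 16 ^ k := by
    rw [hsplit1, hsplit2, hva1, hva2]; ring
  have hTdiv : (pvVal l1 + pvVal l2) / 16 ^ k
      = (pvVal (l1.take k) + pvVal (l2.take k)) / 16 ^ k
        + (hex_to_dec l1[k] + hex_to_dec l2[k] + 16 * (pvVal (l1.drop (k+1)) + pvVal (l2.drop (k+1)))) := by
    rw [hT, Int.add_mul_ediv_right _ _ (by omega : (16:Int) ^ k ≠ 0)]
  have hmod : (pvVal l1 + pvVal l2) / 16 ^ k % 16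
      = (hex_to_dec l1[k] + hex_to_dec l2[k] + (pvVal (l1.take k) + pvVal (l2.take k)) / 16 ^ k) % 16 := by
    rw [hTdiv]; omega
  have hT1 : pvVal (l1.take (k+1)) + pvVal (l2.take (k+1)) =
      (pvVal (l1.take k) + pvVal (l2.take k)) + (hex_to_dec l1[k] + hex_to_dec l2[k]) * 16 ^ k := by
    rw [hva1, hva2]; ring
  have hcarry : (pvVal (l1.take (k+1)) + pvVal (l2.take (k+1))) / 16 ^ (k+1)
      = (hex_to_dec l1[k] + hex_to_dec l2[k] + (pvVal (l1.take k) + pvVal (l2.take k)) / 16 ^ k) / 16 := by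
    rw [pow_succ, ← Int.ediv_ediv_of_nonneg (by positivity), hT1,
      Int.add_mul_ediv_right _ _ (by omega : (16:Int) ^ k ≠ 0)]
    omega
  simp only [pvBodyA, hg1, hg2]
  rw [pvRdig_succ_append, hmod, hcarry]
  by_cases hgt : hex_to_dec l1[k] + hex_to_dec l2[k] + (pvVal (l1.take k) + pvVal (l2.take k)) / 16 ^ k > 15
  · rw [if_pos hgt, dec_to_hex_eq_dig _ (by omega) (by omega)]
    have hm : (hex_to_dec l1[k] + hex_to_dec l2[k] + (pvVal (l1.take k) + pvVal (l2.take k)) / 16 ^ k) % 16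
        = hex_to_dec l1[k] + hex_to_dec l2[k] + (pvVal (l1.take k) + pvVal (l2.take k)) / 16 ^ k - 16 := by omega
    have hq : (hex_to_dec l1[k] + hex_to_dec l2[k] + (pvVal (l1.take k) + pvVal (l2.take k)) / 16 ^ k) / 16
        = 1 := by omega
    rw [hm, hq]
  · rw [if_neg hgt, dec_to_hex_eq_dig _ (by omega) (by omega)]
    have hm : (hex_to_dec l1[k] + hex_to_dec l2[k] + (pvVal (l1.take k) + pvVal (l2.take k)) / 16 ^ k) % 16
        = hex_to_dec l1[k] + hex_to_dec l2[k] + (pvVal (l1.take k) + pvVal (l2.take k)) / 16 ^ k := by omega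
    have hq : (hex_to_dec l1[k] + hex_to_dec l2[k] + (pvVal (l1.take k) + pvVal (l2.take k)) / 16 ^ k) / 16
        = 0 := by omega
    rw [hm, hq]

-- A's loop invariant: after k < n steps the state is the k low digits of the total and
-- the carry is the prefix sum divided by 16^k.
lemma a_loop (l1 l2 : List String) (n : Nat)
    (h1 : l1.length = n) (h2 : l2.length = n)
    (hv1 : ∀ d ∈ l1, d ∈ hexKeys) (hv2 : ∀ d ∈ l2, d ∈ hexKeys)
    (k : Nat) (hk : k < n) :
    (List.range k).foldl (pvBodyA l1 l2 n) ([], 0)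
    = (pvRdig k (pvVal l1 + pvVal l2), (pvVal (l1.take k) + pvVal (l2.take k)) / 16 ^ k) := by
  induction k with
  | zero => simp [pvRdig, pvVal]
  | succ k ih =>
    rw [List.range_succ, List.foldl_append, ih (by omega)]
    simp only [List.foldl_cons, List.foldl_nil]
    rw [a_step l1 l2 n h1 h2 hv1 hv2 k (by omega)]
    simp only []
    rw [if_neg (by omega)]

-- ===== VERDICT (by name: the statement is the Claim_ definition above) =====
theorem hex_addition_spec : Claim_equal_hex_addition := by
  intro l1 l2 _ hpre
  obtain ⟨hlen, hv1, hv2⟩ := hpre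
  unfold Spec_hex_addition
  rcases Nat.eq_zero_or_pos l1.length with h0 | hpos
  · have e1 : l1 = [] := List.eq_nil_of_length_eq_zero h0
    have e2 : l2 = [] := List.eq_nil_of_length_eq_zero (by omega)
    subst e1 e2; decide
  · -- rewrite A into its named-body form
    have hA : hex_addition l1 l2 = ((List.range l1.length).foldl (pvBodyA l1 l2 l1.length) ([], 0)).1 := by
      simp only [hex_addition]
      rw [← hlen, max_self]
      rfl
    -- rewrite B using the Horner and emission lemmas
    have hB : hex_addition_alt l1 l2 =
        (if (pvVal l1 + pvVal l2) / 16 ^ l1.length ≠ 0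
         then pvRdig l1.length (pvVal l1 + pvVal l2) ++ [PySem.Int.toStr ((pvVal l1 + pvVal l2) / 16 ^ l1.length)]
         else pvRdig l1.length (pvVal l1 + pvVal l2)) := by
      simp only [hex_addition_alt]
      rw [horner_eq_val l1 hv1, horner_eq_val l2 hv2, b_loop]
      simp
    obtain ⟨m, hm⟩ : ∃ m, l1.length = m + 1 := ⟨l1.length - 1, by omega⟩
    have hb1 := pvVal_bounds l1 hv1
    have hb2 := pvVal_bounds l2 hv2
    rw [← hlen] at hb2
    have hpow : (0:Int) < 16 ^ l1.length := by positivity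
    have hC0 : 0 ≤ (pvVal l1 + pvVal l2) / 16 ^ l1.length := Int.ediv_nonneg (by omega) (by omega)
    have hC2 : (pvVal l1 + pvVal l2) / 16 ^ l1.length < 2 := by
      rw [Int.ediv_lt_iff_lt_mul hpow]; omega
    rw [hA, hB]
    rw [hm, List.range_succ, List.foldl_append,
      a_loop l1 l2 (m+1) hm (by omega) hv1 hv2 m (by omega)]
    simp only [List.foldl_cons, List.foldl_nil]
    rw [a_step l1 l2 (m+1) hm (by omega) hv1 hv2 m (by omega)]
    simp only []
    rw [show l1.take (m+1) = l1 from by rw [← hm, List.take_length],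
        show l2.take (m+1) = l2 from by rw [show m+1 = l2.length from by omega, List.take_length]]
    rw [hm] at hC0 hC2
    interval_cases hCv : (pvVal l1 + pvVal l2) / 16 ^ (m+1)
    · rw [if_neg (by simp), if_neg (by simp)]
    · rw [if_pos ⟨rfl, by norm_num⟩, if_pos (by norm_num)]
      show pvRdig (m+1) _ ++ _ = _
      congr 1
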